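-- pv_equiv track=rewrite | github.com/hhh101/googology | bigg.py | f
-- ===== SOURCE A (Python) =====
-- def f(n,x,m):
--   d=0
--   e=0
--   k=len(n)-1
--   while n[k]>=n[-1]:
--     k-=1
--   if x[-1]>0:
--     while n[k]>=n[-1] or x[k]>=x[-1]:
--       k-=1
--     d=n[-1]-n[k]
--     e=x[-1]-n[k]-1
--   n.pop()
--   x.pop()
--   if k>0:
--     i=m
--     while i>0:
--       n.append(n[k]+d)
--       x.append(x[k]+e)
--       k+=1
--       i-=1
--   return n, x
-- ===== SOURCE B (Python) =====
-- def f(n, x, m):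
--     last_n = n[-1]
--     last_x = x[-1]
--     L = len(n) - 1
--     if last_x > 0:
--         k = max(j for j in range(L) if n[j] < last_n and x[j] < last_x)
--         d = last_n - n[k]
--         e = last_x - n[k] - 1
--     else:
--         k = max(j for j in range(L) if n[j] < last_n)
--         d = 0
--         e = 0
--     n.pop()
--     x.pop()
--     if k > 0:
--         p = len(n) - k
--         base_n = n[k:]
--         base_x = x[k:]
--         for i in range(m):
--             n.append(base_n[i % p] + d * (i // p + 1))
--             x.append(base_x[i % p] + e * (i // p + 1))
--     return n, x
-- ===== Notes on version B (the rewrite author's own statement) =====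
-- stated objective: alternative
-- what changed: B replaces A's second downward scan by a direct maximum over the candidate indices and replaces A's self-referential append loop (which re-reads the growing lists) by a closed-form periodic formula over the snapshot of the base block, so the appended values are computed from the original popped lists only.
-- outside the precondition, e.g. on f([-4, 4], [4, 1, 3], -2): A returns ([-4], [4, 1]), B raises ValueError
import Mathlib
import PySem

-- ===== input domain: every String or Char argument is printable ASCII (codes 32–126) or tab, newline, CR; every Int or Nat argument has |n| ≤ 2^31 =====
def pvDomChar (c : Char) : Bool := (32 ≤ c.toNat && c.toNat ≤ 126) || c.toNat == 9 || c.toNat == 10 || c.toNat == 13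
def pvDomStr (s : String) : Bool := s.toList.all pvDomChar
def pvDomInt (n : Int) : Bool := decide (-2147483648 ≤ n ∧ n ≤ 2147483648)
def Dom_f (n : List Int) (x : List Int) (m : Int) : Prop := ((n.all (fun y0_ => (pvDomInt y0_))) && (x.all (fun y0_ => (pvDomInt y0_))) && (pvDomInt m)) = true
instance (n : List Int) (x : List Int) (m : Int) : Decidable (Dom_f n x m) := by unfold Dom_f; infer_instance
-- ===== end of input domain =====

-- B replaces A's second backward scan by a direct maximum over candidate indices and A's
-- self-referential append loop by a closed-form periodic formula over the popped base block
-- (alternative decomposition; both mutate n and x in place in Python — equivalence here is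
-- about the returned value).

-- ===== PORT A =====
-- while n[k] >= n[-1]: k -= 1   (fuel-bounded; pyGet? none = IndexError, outside Pre_)
def f_loop1 (n : List Int) (lastN : Int) : Nat → Int → Int
  | 0, k => k
  | fuel+1, k =>
    match PySem.List.pyGet? n k with
    | none => k
    | some v => if lastN ≤ v then f_loop1 n lastN fuel (k-1) else k

-- while n[k] >= n[-1] or x[k] >= x[-1]: k -= 1   (short-circuit 'or' as in Python)
def f_loop2 (n x : List Int) (lastN lastX : Int) : Nat → Int → Int
  | 0, k => k
  | fuel+1, k =>
    match PySem.List.pyGet? n k with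
    | none => k
    | some nv =>
      if lastN ≤ nv then f_loop2 n x lastN lastX fuel (k-1)
      else
        match PySem.List.pyGet? x k with
        | none => k
        | some xv => if lastX ≤ xv then f_loop2 n x lastN lastX fuel (k-1) else k

-- while i > 0: n.append(n[k]+d); x.append(x[k]+e); k += 1; i -= 1
def f_loopApp (d e : Int) : Nat → List Int → List Int → Int → List Int × List Int
  | 0, N, X, _ => (N, X)
  | i+1, N, X, k =>
      f_loopApp d e i (N ++ [(PySem.List.pyGet? N k).getD 0 + d])
                      (X ++ [(PySem.List.pyGet? X k).getD 0 + e]) (k+1)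

def f (n : List Int) (x : List Int) (m : Int) : List Int × List Int :=
  let lastN := (PySem.List.pyGet? n (-1)).getD 0
  let k1 := f_loop1 n lastN (2*n.length+2) ((n.length : Int) - 1)
  let lastX := (PySem.List.pyGet? x (-1)).getD 0
  let kde :=
    if 0 < lastX then
      let k2 := f_loop2 n x lastN lastX (2*n.length+2) k1
      let nk := (PySem.List.pyGet? n k2).getD 0
      (k2, lastN - nk, lastX - nk - 1)
    else (k1, (0:Int), (0:Int))
  let n' := n.dropLast
  let x' := x.dropLast
  if 0 < kde.1 then f_loopApp kde.2.1 kde.2.2 m.toNat n' x' kde.1 else (n', x')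

-- ===== PORT B =====
-- Python's max(...) over an index generator, as an Option-valued maximum (none = empty ⇒ ValueError in Python; -1 junk default, unreachable under Pre_)
def natMaxToInt (o : Option Nat) : Int :=
  match o with
  | some j => (j : Int)
  | none => -1

def f_alt (n : List Int) (x : List Int) (m : Int) : List Int × List Int :=
  let lastN := (PySem.List.pyGet? n (-1)).getD 0
  let lastX := (PySem.List.pyGet? x (-1)).getD 0
  let L := n.length - 1
  let kde :=
    if 0 < lastX then
      let cand := (List.range L).filter
        (fun j => decide (n.getD j 0 < lastN) && decide (x.getD j 0 < lastX))
      let k : Int := natMaxToInt cand.max?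
      let nk := (PySem.List.pyGet? n k).getD 0
      (k, lastN - nk, lastX - nk - 1)
    else
      let cand := (List.range L).filter (fun j => decide (n.getD j 0 < lastN))
      (natMaxToInt cand.max?, (0:Int), (0:Int))
  let n' := n.dropLast
  let x' := x.dropLast
  if 0 < kde.1 then
    let kn := kde.1.toNat
    let p := n'.length - kn
    (n' ++ (List.range m.toNat).map
        (fun i => (n'.drop kn).getD (i % p) 0 + kde.2.1 * (((i / p : Nat) : Int) + 1)),
     x' ++ (List.range m.toNat).map
        (fun i => (x'.drop kn).getD (i % p) 0 + kde.2.2 * (((i / p : Nat) : Int) + 1)))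
  else (n', x')

-- ===== PRECONDITION & SPEC =====
-- Pre_ requires the two parallel sequences to have equal length (A happens to return a value on
-- some mismatched-length inputs by indexing the shorter list's suffix — an accident of the
-- shared index k; B's candidate search may raise there) and requires each backward scan to have
-- a stopping index (otherwise A's scans wrap past the front and raise IndexError).
def Pre_f (n : List Int) (x : List Int) (m : Int) : Prop :=
  n.length = x.length ∧
  (∃ j, j < n.length - 1 ∧ n.getD j 0 < n.getD (n.length - 1) 0) ∧
  (0 < x.getD (x.length - 1) 0 →
    ∃ j, j < n.length - 1 ∧ n.getD j 0 < n.getD (n.length - 1) 0 ∧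
         x.getD j 0 < x.getD (x.length - 1) 0)
instance (n : List Int) (x : List Int) (m : Int) : Decidable (Pre_f n x m) := by
  unfold Pre_f; infer_instance

def pvWitness_f : List Int × List Int × Int := ([0, 1], [0, 0], 1)

def Spec_f (n : List Int) (x : List Int) (m : Int) (out : List Int × List Int) : Prop := out = f_alt n x m
instance (n : List Int) (x : List Int) (m : Int) (out : List Int × List Int) : Decidable (Spec_f n x m out) := by unfold Spec_f; infer_instance

-- ===== CLAIM (what is proved, stated in full; the proofs are below) =====
def Claim_equal_f : Prop := ∀ (n : List Int) (x : List Int) (m : Int), Dom_f n x m → Pre_f n x m → Spec_f n x m (f n x m)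

-- ===== LEMMAS AND PROOFS =====

-- greatest j < t with p j, computed downward (proof-side spec of both versions' searches)
def gmax (p : Nat → Bool) : Nat → Option Nat
  | 0 => none
  | t+1 => if p t then some t else gmax p t

theorem gmax_spec (p : Nat → Bool) (t j : Nat) (h : gmax p t = some j) :
    p j = true ∧ j < t ∧ ∀ i, j < i → i < t → p i = false := by
  induction t with
  | zero => simp [gmax] at h
  | succ t ih =>
    unfold gmax at h
    by_cases hp : p t = true
    · simp [hp] at h
      subst h
      exact ⟨hp, Nat.lt_succ_self _, fun i hji hit => by omega⟩
    · simp [hp] at h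
      obtain ⟨h1, h2, h3⟩ := ih h
      refine ⟨h1, by omega, fun i hji hit => ?_⟩
      by_cases hit' : i < t
      · exact h3 i hji hit'
      · have : i = t := by omega
        subst this
        simpa using hp

theorem gmax_exists (p : Nat → Bool) (t : Nat) (h : ∃ j, j < t ∧ p j = true) :
    ∃ j, gmax p t = some j := by
  induction t with
  | zero => omega
  | succ t ih =>
    unfold gmax
    by_cases hp : p t = true
    · exact ⟨t, by simp [hp]⟩
    · obtain ⟨j, hj, hpj⟩ := h
      have hjt : j < t := by
        rcases Nat.lt_succ_iff_lt_or_eq.mp hj with h' | h'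
        · exact h'
        · subst h'; exact absurd hpj hp
      obtain ⟨j', hj'⟩ := ih ⟨j, hjt, hpj⟩
      exact ⟨j', by simp [hp, hj']⟩

theorem gmax_trunc (p : Nat → Bool) (t u : Nat) (hu : u ≤ t)
    (h : ∀ j, u ≤ j → j < t → p j = false) : gmax p t = gmax p u := by
  induction t with
  | zero => have : u = 0 := by omega
            simp [this]
  | succ t ih =>
    by_cases hut : u = t + 1
    · simp [hut]
    · have hut' : u ≤ t := by omega
      have hpt : p t = false := h t hut' (by omega)
      have step : gmax p (t+1) = gmax p t := by
        rw [show gmax p (t+1) = if p t = true then some t else gmax p t from rfl, hpt]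
        simp
      rw [step]
      exact ih hut' (fun j h1 h2 => h j h1 (by omega))

theorem foldl_max_append (b : Nat) : ∀ (l : List Nat) (a : Nat), a ≤ b → (∀ c ∈ l, c ≤ b) →
    List.foldl max a (l ++ [b]) = b := by
  intro l
  induction l with
  | nil => intro a ha _; simpa using ha
  | cons c l ih =>
    intro a ha hc
    simp only [List.cons_append, List.foldl_cons]
    exact ih (max a c) (by have := hc c (by simp); omega) (fun d hd => hc d (by simp [hd]))

theorem max?_append_singleton (l : List Nat) (b : Nat) (h : ∀ a ∈ l, a ≤ b) :
    (l ++ [b]).max? = some b := by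
  cases l with
  | nil => rfl
  | cons a l =>
    show some (List.foldl max a (l ++ [b])) = some b
    rw [foldl_max_append b l a (h a (by simp)) (fun c hc => h c (by simp [hc]))]

theorem max?_range_filter (p : Nat → Bool) (t : Nat) :
    ((List.range t).filter p).max? = gmax p t := by
  induction t with
  | zero => rfl
  | succ t ih =>
    rw [List.range_succ, List.filter_append]
    unfold gmax
    by_cases hp : p t = true
    · simp only [hp]
      rw [List.filter_singleton]
      simp only [hp, if_true]
      exact max?_append_singleton _ t (fun a ha => by
        have := List.mem_range.mp (List.mem_filter.mp ha).1
        omega)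
    · simp only [hp]
      rw [List.filter_singleton]
      simp [hp, ih]

theorem pyGet_getD (n : List Int) (j : Nat) (hj : j < n.length) :
    PySem.List.pyGet? n (j : Int) = some (n.getD j 0) := by
  rw [PySem.List.pyGet?_natCast]
  simp [List.getD_eq_getElem?_getD, List.getElem?_eq_getElem hj]

theorem gmax_step_true (p : Nat → Bool) (t : Nat) (h : p t = true) :
    gmax p (t+1) = some t := by
  rw [show gmax p (t+1) = if p t = true then some t else gmax p t from rfl, h]
  simp

theorem gmax_step_false (p : Nat → Bool) (t : Nat) (h : p t = false) :
    gmax p (t+1) = gmax p t := by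
  rw [show gmax p (t+1) = if p t = true then some t else gmax p t from rfl, h]
  simp

theorem loop1_eq (n : List Int) (lastN : Int) (k fuel : Nat)
    (hk : k < n.length) (hf : k < fuel)
    (hex : ∃ j, j ≤ k ∧ (decide (n.getD j 0 < lastN)) = true) :
    f_loop1 n lastN fuel (k : Int) = natMaxToInt (gmax (fun j => decide (n.getD j 0 < lastN)) (k+1)) := by
  induction k generalizing fuel with
  | zero =>
    obtain ⟨j, hj, hpj⟩ := hex
    have hj0 : j = 0 := by omega
    subst hj0
    cases fuel with
    | zero => omega
    | succ f =>
      simp only [f_loop1, pyGet_getD n 0 hk]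
      have hne : ¬ lastN ≤ n.getD 0 0 := not_le.mpr (of_decide_eq_true hpj)
      rw [if_neg hne, gmax_step_true (fun j => decide (n.getD j 0 < lastN)) 0 hpj]
      rfl
  | succ k ih =>
    cases fuel with
    | zero => omega
    | succ f =>
      simp only [f_loop1, pyGet_getD n (k+1) hk]
      by_cases hp : n.getD (k+1) 0 < lastN
      · have hnle : ¬ lastN ≤ n.getD (k+1) 0 := not_le.mpr hp
        rw [if_neg hnle, gmax_step_true (fun j => decide (n.getD j 0 < lastN)) (k+1) (decide_eq_true hp)]
        rfl
      · have hle : lastN ≤ n.getD (k+1) 0 := not_lt.mp hp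
        have hcast : ((k+1 : Nat) : Int) - 1 = (k : Int) := by push_cast; ring
        have hex' : ∃ j, j ≤ k ∧ (decide (n.getD j 0 < lastN)) = true := by
          obtain ⟨j, hj, hpj⟩ := hex
          refine ⟨j, ?_, hpj⟩
          rcases Nat.lt_succ_iff_lt_or_eq.mp (Nat.lt_succ_of_le hj) with h' | h'
          · omega
          · subst h'; exact absurd (of_decide_eq_true hpj) hp
        rw [if_pos hle, hcast, ih f (by omega) (by omega) hex',
            gmax_step_false (fun j => decide (n.getD j 0 < lastN)) (k+1) (decide_eq_false hp)]

theorem loop2_eq (n x : List Int) (lastN lastX : Int) (k fuel : Nat)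
    (hk : k < n.length) (hkx : k < x.length) (hf : k < fuel)
    (hex : ∃ j, j ≤ k ∧ ((decide (n.getD j 0 < lastN)) && (decide (x.getD j 0 < lastX))) = true) :
    f_loop2 n x lastN lastX fuel (k : Int) =
      natMaxToInt (gmax (fun j => (decide (n.getD j 0 < lastN)) && (decide (x.getD j 0 < lastX))) (k+1)) := by
  induction k generalizing fuel with
  | zero =>
    obtain ⟨j, hj, hpj⟩ := hex
    have hj0 : j = 0 := by omega
    subst hj0
    rw [Bool.and_eq_true] at hpj
    cases fuel with
    | zero => omega
    | succ f =>
      simp only [f_loop2, pyGet_getD n 0 hk, pyGet_getD x 0 hkx]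
      have h1 : ¬ lastN ≤ n.getD 0 0 := not_le.mpr (of_decide_eq_true hpj.1)
      have h2 : ¬ lastX ≤ x.getD 0 0 := not_le.mpr (of_decide_eq_true hpj.2)
      rw [if_neg h1, if_neg h2, gmax_step_true (fun j => (decide (n.getD j 0 < lastN)) && (decide (x.getD j 0 < lastX))) 0 (by rw [Bool.and_eq_true]; exact hpj)]
      rfl
  | succ k ih =>
    cases fuel with
    | zero => omega
    | succ f =>
      simp only [f_loop2, pyGet_getD n (k+1) hk, pyGet_getD x (k+1) hkx]
      have hcast : ((k+1 : Nat) : Int) - 1 = (k : Int) := by push_cast; ring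
      by_cases hpn : n.getD (k+1) 0 < lastN
      · have hnle : ¬ lastN ≤ n.getD (k+1) 0 := not_le.mpr hpn
        by_cases hpx : x.getD (k+1) 0 < lastX
        · have hxle : ¬ lastX ≤ x.getD (k+1) 0 := not_le.mpr hpx
          rw [if_neg hnle, if_neg hxle, gmax_step_true (fun j => (decide (n.getD j 0 < lastN)) && (decide (x.getD j 0 < lastX))) (k+1) (by rw [Bool.and_eq_true]; exact ⟨decide_eq_true hpn, decide_eq_true hpx⟩)]
          rfl
        · have hxle : lastX ≤ x.getD (k+1) 0 := not_lt.mp hpx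
          have hex' : ∃ j, j ≤ k ∧ ((decide (n.getD j 0 < lastN)) && (decide (x.getD j 0 < lastX))) = true := by
            obtain ⟨j, hj, hpj⟩ := hex
            refine ⟨j, ?_, hpj⟩
            rcases Nat.lt_succ_iff_lt_or_eq.mp (Nat.lt_succ_of_le hj) with h' | h'
            · omega
            · subst h'
              rw [Bool.and_eq_true] at hpj
              exact absurd (of_decide_eq_true hpj.2) hpx
          rw [if_neg hnle, if_pos hxle, hcast, ih f (by omega) (by omega) (by omega) hex',
              gmax_step_false (fun j => (decide (n.getD j 0 < lastN)) && (decide (x.getD j 0 < lastX))) (k+1) (by simp only [decide_eq_false hpx, Bool.and_false])]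
      · have hle : lastN ≤ n.getD (k+1) 0 := not_lt.mp hpn
        have hex' : ∃ j, j ≤ k ∧ ((decide (n.getD j 0 < lastN)) && (decide (x.getD j 0 < lastX))) = true := by
          obtain ⟨j, hj, hpj⟩ := hex
          refine ⟨j, ?_, hpj⟩
          rcases Nat.lt_succ_iff_lt_or_eq.mp (Nat.lt_succ_of_le hj) with h' | h'
          · omega
          · subst h'
            rw [Bool.and_eq_true] at hpj
            exact absurd (of_decide_eq_true hpj.1) hpn
        rw [if_pos hle, hcast, ih f (by omega) (by omega) (by omega) hex',
            gmax_step_false (fun j => (decide (n.getD j 0 < lastN)) && (decide (x.getD j 0 < lastX))) (k+1) (by simp only [decide_eq_false hpn, Bool.false_and])]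

theorem getD_drop (l : List Int) (a b : Nat) : (l.drop a).getD b 0 = l.getD (a+b) 0 := by
  simp [List.getD_eq_getElem?_getD, List.getElem?_drop]

-- one step of the periodic closed form: shifting the base block by one rotates the formula
theorem step_val (N : List Int) (k : Nat) (c : Int) (hk : k < N.length) (i : Nat) :
    (N.drop (k+1) ++ [N.getD k 0 + c]).getD (i % (N.length - k)) 0
        + c * (((i / (N.length - k) : Nat) : Int) + 1)
    = (N.drop k).getD ((i+1) % (N.length - k)) 0
        + c * ((((i+1) / (N.length - k) : Nat) : Int) + 1) := by
  set p := N.length - k with hpdef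
  have hp : 0 < p := by omega
  have hlen1 : (N.drop (k+1)).length = p - 1 := by simp [hpdef]; omega
  have hr : i % p < p := Nat.mod_lt _ hp
  have hi : p * (i / p) + i % p = i := Nat.div_add_mod i p
  by_cases hcase : i % p + 1 < p
  · have h1 : (i+1) % p = i % p + 1 := by
      have : i + 1 = p * (i / p) + (i % p + 1) := by omega
      rw [this, Nat.mul_add_mod, Nat.mod_eq_of_lt hcase]
    have h2 : (i+1) / p = i / p := by
      have : i + 1 = p * (i / p) + (i % p + 1) := by omega
      rw [this, Nat.mul_add_div hp, Nat.div_eq_of_lt hcase, Nat.add_zero]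
    rw [h1, h2]
    have hidx : (N.drop (k+1) ++ [N.getD k 0 + c]).getD (i % p) 0 = (N.drop (k+1)).getD (i % p) 0 := by
      simp only [List.getD_eq_getElem?_getD]
      rw [List.getElem?_append_left (by omega)]
    rw [hidx, getD_drop, getD_drop]
    congr 2
    omega
  · have hrp : i % p + 1 = p := by omega
    have hmul : p * (i / p + 1) = p * (i / p) + p := by ring
    have h1 : (i+1) % p = 0 := by
      have : i + 1 = p * (i / p + 1) := by omega
      rw [this, Nat.mul_mod_right]
    have h2 : (i+1) / p = i / p + 1 := by
      have : i + 1 = p * (i / p + 1) + 0 := by omega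
      rw [this, Nat.mul_add_div hp, Nat.zero_div, Nat.add_zero]
    rw [h1, h2]
    have hidx : (N.drop (k+1) ++ [N.getD k 0 + c]).getD (i % p) 0 = N.getD k 0 + c := by
      simp only [List.getD_eq_getElem?_getD]
      rw [List.getElem?_append_right (by omega), hlen1]
      have : i % p - (p - 1) = 0 := by omega
      rw [this]
      rfl
    rw [hidx, getD_drop, Nat.add_zero]
    push_cast
    ring

-- appending one computed element absorbs into the closed form with index shifted by one
theorem append_periodic (N : List Int) (k : Nat) (c : Int) (t : Nat) (hk : k < N.length) :
    (N ++ [N.getD k 0 + c]) ++ (List.range t).map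
        (fun i => ((N ++ [N.getD k 0 + c]).drop (k+1)).getD (i % ((N ++ [N.getD k 0 + c]).length - (k+1))) 0
                   + c * (((i / ((N ++ [N.getD k 0 + c]).length - (k+1)) : Nat) : Int) + 1))
    = N ++ (List.range (t+1)).map
        (fun i => (N.drop k).getD (i % (N.length - k)) 0 + c * (((i / (N.length - k) : Nat) : Int) + 1)) := by
  have hp : 0 < N.length - k := by omega
  have hlen : (N ++ [N.getD k 0 + c]).length - (k+1) = N.length - k := by simp
  have hdrop : (N ++ [N.getD k 0 + c]).drop (k+1) = N.drop (k+1) ++ [N.getD k 0 + c] :=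
    List.drop_append_of_le_length (by omega)
  have hsplit : ∀ (v : Int) (rest : List Int), N ++ (v :: rest) = (N ++ [v]) ++ rest := by
    intro v rest; simp
  have hg0 : ((N.drop k).getD (0 % (N.length - k)) 0 + c * ((((0 / (N.length - k) : Nat)) : Int) + 1) : Int)
      = N.getD k 0 + c := by
    rw [Nat.zero_mod, Nat.zero_div, getD_drop, Nat.add_zero]
    norm_num
  rw [hlen, hdrop, List.range_succ_eq_map, List.map_cons, List.map_map, hg0]
  conv_rhs => rw [hsplit]
  congr 1
  apply List.map_congr_left
  intro i _
  simp only [Function.comp]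
  exact step_val N k c hk i

theorem loopApp_eq (d e : Int) (t : Nat) :
    ∀ (N X : List Int) (k : Nat), k < N.length → k < X.length →
    f_loopApp d e t N X (k : Int) =
      (N ++ (List.range t).map
          (fun i => (N.drop k).getD (i % (N.length - k)) 0 + d * (((i / (N.length - k) : Nat) : Int) + 1)),
       X ++ (List.range t).map
          (fun i => (X.drop k).getD (i % (X.length - k)) 0 + e * (((i / (X.length - k) : Nat) : Int) + 1))) := by
  induction t with
  | zero => intro N X k _ _; simp [f_loopApp]
  | succ t ih =>
    intro N X k hN hX
    simp only [f_loopApp, pyGet_getD N k hN, pyGet_getD X k hX, Option.getD_some]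
    have hcast : (k : Int) + 1 = ((k+1 : Nat) : Int) := by push_cast; ring
    rw [hcast, ih (N ++ [N.getD k 0 + d]) (X ++ [X.getD k 0 + e]) (k+1)
        (by simp; omega) (by simp; omega)]
    exact Prod.ext (append_periodic N k d t hN) (append_periodic X k e t hX)

theorem pyGet_last (l : List Int) (h : 0 < l.length) :
    PySem.List.pyGet? l (-1) = some (l.getD (l.length - 1) 0) := by
  rw [PySem.List.pyGet?_neg_one, List.getLast?_eq_getElem?]
  simp [List.getD_eq_getElem?_getD, List.getElem?_eq_getElem (show l.length - 1 < l.length by omega)]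

-- ===== VERDICT (by name: the statement is the Claim_ definition above) =====
theorem f_spec : Claim_equal_f := by
  intro n x m _ hpre
  obtain ⟨hlen, hex1, hex2⟩ := hpre
  have h2 : 2 ≤ n.length := by obtain ⟨j, hj, _⟩ := hex1; omega
  have hlastn := pyGet_last n (by omega)
  have hlastx := pyGet_last x (by omega)
  unfold Spec_f f f_alt
  simp only [hlastn, hlastx, Option.getD_some]
  set lastN := n.getD (n.length - 1) 0 with hlastNdef
  set lastX := x.getD (x.length - 1) 0 with hlastXdef
  set L := n.length - 1 with hLdef
  set pn := fun j => decide (n.getD j 0 < lastN) with hpndef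
  set pb := fun j => (decide (n.getD j 0 < lastN) && decide (x.getD j 0 < lastX)) with hpbdef
  have hc1 : ((n.length : Int) - 1) = ((L : Nat) : Int) := by
    rw [hLdef, Nat.cast_sub (by omega)]; norm_num
  -- loop1 result = greatest index below L with n[j] < lastN
  have hpnL : pn L = false := by simp [hpndef, hlastNdef, hLdef]
  have hex1' : ∃ j, j ≤ L ∧ pn j = true := by
    obtain ⟨j, hj, hp⟩ := hex1
    exact ⟨j, by omega, decide_eq_true hp⟩
  have hloop1 : f_loop1 n lastN (2*n.length+2) ((n.length : Int) - 1)
      = natMaxToInt (gmax pn L) := by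
    rw [hc1, loop1_eq n lastN L (2*n.length+2) (by omega) (by omega) hex1',
        gmax_step_false pn L hpnL]
  obtain ⟨k1, hk1⟩ := gmax_exists pn L (by obtain ⟨j, hj, hp⟩ := hex1; exact ⟨j, hj, decide_eq_true hp⟩)
  obtain ⟨hk1p, hk1L, hk1max⟩ := gmax_spec pn L k1 hk1
  rw [hloop1, hk1, max?_range_filter pn L, max?_range_filter pb L, hk1]
  simp only [natMaxToInt]
  have hdln : n.dropLast.length = L := by simp [hLdef]
  have hdlx : x.dropLast.length = L := by simp [hLdef]; omega
  by_cases hx : 0 < lastX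
  · -- second scan runs
    obtain ⟨j0, hj0L, hpn0, hpx0⟩ := hex2 (by rwa [hlastXdef] at hx ⊢)
    have hj0k1 : j0 ≤ k1 := by
      by_contra hcon
      exact absurd hpn0 (of_decide_eq_false (hk1max j0 (by omega) hj0L))
    have hexb : ∃ j, j ≤ k1 ∧ pb j = true :=
      ⟨j0, hj0k1, by
        show (decide (n.getD j0 0 < lastN) && decide (x.getD j0 0 < lastX)) = true
        rw [decide_eq_true hpn0, decide_eq_true hpx0]
        rfl⟩
    have hloop2 : f_loop2 n x lastN lastX (2*n.length+2) ((k1 : Nat) : Int)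
        = natMaxToInt (gmax pb (k1+1)) :=
      loop2_eq n x lastN lastX k1 (2*n.length+2) (by omega) (by omega) (by omega) hexb
    have htr : gmax pb L = gmax pb (k1+1) := by
      apply gmax_trunc pb L (k1+1) (by omega)
      intro j h1 h2'
      show (decide (n.getD j 0 < lastN) && decide (x.getD j 0 < lastX)) = false
      rw [show (decide (n.getD j 0 < lastN)) = false from hk1max j (by omega) h2', Bool.false_and]
    obtain ⟨k2, hk2⟩ := gmax_exists pb (k1+1) (by obtain ⟨j, hj, hp⟩ := hexb; exact ⟨j, by omega, hp⟩)
    obtain ⟨hk2p, hk2k1, _⟩ := gmax_spec pb (k1+1) k2 hk2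
    rw [if_pos hx, if_pos hx, hloop2, hk2, htr, hk2]
    simp only [natMaxToInt]
    by_cases hkpos : 0 < ((k2 : Nat) : Int)
    · have hk2n : 0 < k2 := by exact_mod_cast hkpos
      rw [if_pos hkpos, if_pos hkpos,
          loopApp_eq _ _ m.toNat n.dropLast x.dropLast k2 (by omega) (by omega)]
      rw [Int.toNat_natCast]
      rw [show x.dropLast.length = n.dropLast.length by omega]
    · rw [if_neg hkpos, if_neg hkpos]
  · -- no second scan
    rw [if_neg hx, if_neg hx]
    by_cases hkpos : 0 < ((k1 : Nat) : Int)
    · have hk1n : 0 < k1 := by exact_mod_cast hkpos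
      rw [if_pos hkpos, if_pos hkpos,
          loopApp_eq _ _ m.toNat n.dropLast x.dropLast k1 (by omega) (by omega)]
      rw [Int.toNat_natCast]
      rw [show x.dropLast.length = n.dropLast.length by omega]
    · rw [if_neg hkpos, if_neg hkpos]
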